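-- pv_equiv track=rewrite | github.com/Igor9rov/2016 | 2015-2016/CompareGeekTimes&Habr/Final/compare.py | buildimportantwords
-- ===== SOURCE A (Python) =====
-- def buildimportantwords(text):
--     PreAllwords = []
--     Allwords = []
--     for i in text:
--         for j in i:
--             Acces = j in PreAllwords
--             if Acces == False:
--                 PreAllwords.append(j)
--             else:
--                 Check = j in Allwords
--                 if Check == False:
--                     Allwords.append(j)
--     return Allwords
-- ===== SOURCE B (Python) =====
-- def buildimportantwords(text):
--     words = [w for row in text for w in row]
--     positions = {}
--     for i, w in enumerate(words):
--         positions.setdefault(w, []).append(i)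
--     dups = [w for w, ps in positions.items() if len(ps) > 1]
--     dups.sort(key=lambda w: positions[w][1])
--     return dups
-- ===== Notes on version B (the rewrite author's own statement) =====
-- stated objective: faster
-- what changed: Staged algorithm instead of A's stateful membership-scan pass: flatten with a running index, group all occurrence positions per word in one dict pass, select words with more than one position, and sort them by the index of their second occurrence (keys are distinct positions, so the order is exactly A's second-occurrence order).
import Mathlib
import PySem

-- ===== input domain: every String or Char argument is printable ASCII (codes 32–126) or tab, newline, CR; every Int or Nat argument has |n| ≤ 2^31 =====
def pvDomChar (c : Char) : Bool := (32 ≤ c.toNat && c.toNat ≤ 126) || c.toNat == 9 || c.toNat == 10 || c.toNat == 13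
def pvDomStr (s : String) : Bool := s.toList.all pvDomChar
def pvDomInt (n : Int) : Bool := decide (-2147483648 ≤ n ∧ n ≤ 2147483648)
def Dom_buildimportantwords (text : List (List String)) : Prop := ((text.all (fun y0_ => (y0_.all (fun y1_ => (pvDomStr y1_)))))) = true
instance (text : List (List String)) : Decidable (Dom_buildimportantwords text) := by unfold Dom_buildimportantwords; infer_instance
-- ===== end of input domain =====

-- B replaces A's single stateful pass with linear membership scans by a staged algorithm:
-- group all occurrence positions per word in one dict pass over the indexed flattened words,
-- keep the words with more than one position, and sort them by their second-occurrence index.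

-- ===== PORT A =====
-- inner loop body of A: state = (PreAllwords, Allwords)
def pvStepA (st : List String × List String) (j : String) : List String × List String :=
  let acces : Bool := j ∈ st.1
  if acces = false then (st.1 ++ [j], st.2)
  else
    let check : Bool := j ∈ st.2
    if check = false then (st.1, st.2 ++ [j])
    else st

def buildimportantwords (text : List (List String)) : List String :=
  (text.foldl (fun st i => i.foldl pvStepA st) ([], [])).2

-- ===== PORT B =====
-- words = [w for row in text for w in row]
def pvWordsB (text : List (List String)) : List String := text.flatMap id

-- the positions dict: positions.setdefault(w, []).append(i)  ==  positions[w] = positions.get(w, []) + [i]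
def pvPositionsB (text : List (List String)) : PySem.Dict String (List Int) :=
  (PySem.List.enumerate (pvWordsB text)).foldl
    (fun d p => d.modify p.2 [] (· ++ [p.1])) PySem.Dict.empty

def buildimportantwords_alt (text : List (List String)) : List String :=
  -- dups = [w for w, ps in positions.items() if len(ps) > 1], then
  -- dups.sort(key=lambda w: positions[w][1]); positions[w][1] is in range for every
  -- w in dups (at least two positions), so the default 0 is never used
  PySem.List.sorted
    (((pvPositionsB text).items.filter (fun p => decide (1 < p.2.length))).map Prod.fst)
    (fun w => PySem.List.pyGetD ((pvPositionsB text).getD w []) 1 0) false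

-- ===== PRECONDITION & SPEC =====
def Spec_buildimportantwords (text : List (List String)) (out : List String) : Prop := out = buildimportantwords_alt text
instance (text : List (List String)) (out : List String) : Decidable (Spec_buildimportantwords text out) := by unfold Spec_buildimportantwords; infer_instance

-- ===== CLAIM (what is proved, stated in full; the proofs are below) =====
def Claim_equal_buildimportantwords : Prop := ∀ (text : List (List String)), Dom_buildimportantwords text → Spec_buildimportantwords text (buildimportantwords text)

-- ===== LEMMAS AND PROOFS =====

def pvPos (ws : List String) (w : String) : List Int :=
  ((PySem.List.enumerate ws).filter (fun p => p.2 == w)).map (·.1)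

theorem pvPos_append_singleton (ws : List String) (v w : String) :
    pvPos (ws ++ [v]) w = pvPos ws w ++ (if v = w then [(ws.length : Int)] else []) := by
  simp [pvPos, PySem.List.enumerate_append, PySem.List.enumerate_cons, List.filter_append]
  split_ifs with h <;> simp [h]

theorem pvPos_length (ws : List String) (w : String) :
    (pvPos ws w).length = ws.count w := by
  rw [pvPos, List.length_map, ← List.countP_eq_length_filter]
  conv_rhs => rw [← PySem.List.map_snd_enumerate ws 0]
  rw [List.count_eq_countP, List.countP_map]
  rfl

theorem pvPos_mem_lt (ws : List String) (w : String) {x : Int} (hx : x ∈ pvPos ws w) :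
    x < (ws.length : Int) := by
  rw [pvPos] at hx
  obtain ⟨p, hp, rfl⟩ := List.mem_map.mp hx
  have h1 := (List.mem_filter.mp hp).1
  rw [PySem.List.mem_enumerate_iff] at h1
  obtain ⟨k, hk, rfl⟩ := h1
  simp
  omega

def pvKey (ws : List String) (w : String) : Int := PySem.List.pyGetD (pvPos ws w) 1 0

theorem pv_pyGetD_one_append (xs ys : List Int) (h : 2 ≤ xs.length) :
    PySem.List.pyGetD (xs ++ ys) 1 0 = PySem.List.pyGetD xs 1 0 := by
  rw [show (1:Int) = ((1:Nat):Int) from rfl, PySem.List.pyGetD_natCast, PySem.List.pyGetD_natCast]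
  unfold List.getD
  rw [List.getElem?_append_left (by omega)]

theorem pvKey_append (ws : List String) (v w : String) (h : 2 ≤ ws.count w) :
    pvKey (ws ++ [v]) w = pvKey ws w := by
  rw [pvKey, pvKey, pvPos_append_singleton, pv_pyGetD_one_append]
  rw [pvPos_length]; omega

theorem pvKey_lt_length (ws : List String) (w : String) (h : 2 ≤ ws.count w) :
    pvKey ws w < (ws.length : Int) := by
  apply pvPos_mem_lt ws w
  rw [pvKey]
  apply PySem.List.pyGetD_mem
  constructor <;> [skip; skip] <;> (rw [pvPos_length]; omega)

theorem pvKey_append_self (ws : List String) (v : String) (h : ws.count v = 1) :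
    pvKey (ws ++ [v]) v = (ws.length : Int) := by
  have hl : (pvPos ws v).length = 1 := by rw [pvPos_length, h]
  obtain ⟨a, ha⟩ := List.length_eq_one_iff.mp hl
  rw [pvKey, pvPos_append_singleton, if_pos rfl, ha]
  rfl

theorem pvA_inv (ws : List String) :
    (∀ w, w ∈ (ws.foldl pvStepA ([], [])).1 ↔ 1 ≤ ws.count w) ∧
    (∀ w, w ∈ (ws.foldl pvStepA ([], [])).2 ↔ 2 ≤ ws.count w) ∧
    (ws.foldl pvStepA ([], [])).2.Nodup ∧
    (ws.foldl pvStepA ([], [])).2.Pairwise (fun a b => pvKey ws a < pvKey ws b) := by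
  induction ws using List.reverseRecOn with
  | nil => simp
  | append_singleton ws v ih =>
    obtain ⟨h1, h2, h3, h4⟩ := ih
    rw [List.foldl_append, List.foldl_cons, List.foldl_nil]
    set st := ws.foldl pvStepA ([], []) with hst
    have hcv : (ws ++ [v]).count v = ws.count v + 1 := by
      rw [List.count_append]; simp
    have hcn : ∀ w, w ≠ v → (ws ++ [v]).count w = ws.count w := by
      intro w hne; rw [List.count_append]
      have h0 : List.count w [v] = 0 := List.count_eq_zero.mpr (by simp [hne])
      omega
    have hkey : ∀ a, 2 ≤ ws.count a → pvKey (ws ++ [v]) a = pvKey ws a :=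
      fun a ha => pvKey_append ws v a ha
    by_cases hv : v ∈ st.1
    · have hc1 : 1 ≤ ws.count v := (h1 v).mp hv
      by_cases hva : v ∈ st.2
      · have hc2 : 2 ≤ ws.count v := (h2 v).mp hva
        have hstep : pvStepA st v = st := by simp [pvStepA, hv, hva]
        rw [hstep]
        refine ⟨?_, ?_, h3, ?_⟩
        · intro w
          rcases eq_or_ne w v with rfl | hne
          · rw [hcv]; constructor <;> intro _ <;> [omega; exact hv]
          · rw [hcn w hne]; exact h1 w
        · intro w
          rcases eq_or_ne w v with rfl | hne
          · rw [hcv]; constructor <;> intro _ <;> [omega; exact hva]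
          · rw [hcn w hne]; exact h2 w
        · exact h4.imp_of_mem (fun {a b} ha hb hab => by
            rw [hkey a ((h2 a).mp ha), hkey b ((h2 b).mp hb)]; exact hab)
      · have hc2 : ws.count v = 1 := by
          have : ¬ 2 ≤ ws.count v := fun h => hva ((h2 v).mpr h)
          omega
        have hstep : pvStepA st v = (st.1, st.2 ++ [v]) := by simp [pvStepA, hv, hva]
        rw [hstep]
        refine ⟨?_, ?_, ?_, ?_⟩
        · intro w
          rcases eq_or_ne w v with rfl | hne
          · rw [hcv]; constructor <;> intro _ <;> [omega; exact hv]
          · rw [hcn w hne]; exact h1 w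
        · intro w
          rcases eq_or_ne w v with rfl | hne
          · rw [hcv]; simp [hc2]
          · rw [hcn w hne]
            simp only [List.mem_append, List.mem_singleton]
            constructor
            · rintro (hw | rfl)
              · exact (h2 w).mp hw
              · exact absurd rfl hne
            · intro hw; exact Or.inl ((h2 w).mpr hw)
        · exact List.Nodup.append h3 (List.nodup_singleton v)
            (by simpa using fun hmem => hva hmem)
        · rw [List.pairwise_append]
          refine ⟨h4.imp_of_mem (fun {a b} ha hb hab => by
              rw [hkey a ((h2 a).mp ha), hkey b ((h2 b).mp hb)]; exact hab),
            List.pairwise_singleton _ _, ?_⟩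
          intro a ha b hb
          rw [List.mem_singleton] at hb
          have hca : 2 ≤ ws.count a := (h2 a).mp ha
          rw [hb, hkey a hca, pvKey_append_self ws v hc2]
          exact pvKey_lt_length ws a hca
    · have hc0 : ws.count v = 0 := by
        have : ¬ 1 ≤ ws.count v := fun h => hv ((h1 v).mpr h)
        omega
      have hstep : pvStepA st v = (st.1 ++ [v], st.2) := by simp [pvStepA, hv]
      rw [hstep]
      refine ⟨?_, ?_, h3, ?_⟩
      · intro w
        rcases eq_or_ne w v with rfl | hne
        · rw [hcv]; simp
        · rw [hcn w hne]
          simp only [List.mem_append, List.mem_singleton]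
          constructor
          · rintro (hw | rfl)
            · exact (h1 w).mp hw
            · exact absurd rfl hne
          · intro hw; exact Or.inl ((h1 w).mpr hw)
      · intro w
        rcases eq_or_ne w v with rfl | hne
        · rw [hcv, hc0]
          constructor <;> intro hw
          · exact absurd ((h2 _).mp hw) (by omega)
          · omega
        · rw [hcn w hne]; exact h2 w
      · exact h4.imp_of_mem (fun {a b} ha hb hab => by
          rw [hkey a ((h2 a).mp ha), hkey b ((h2 b).mp hb)]; exact hab)

theorem pv_positions_getD (ws : List String) (w : String) :
    ((PySem.List.enumerate ws).foldl
      (fun d p => d.modify p.2 [] (· ++ [p.1])) PySem.Dict.empty).getD w [] = pvPos ws w := by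
  rw [show (PySem.List.enumerate ws).foldl (fun d p => d.modify p.2 [] (· ++ [p.1])) PySem.Dict.empty
      = ((PySem.List.enumerate ws).map Prod.swap).foldl
          (fun d q => d.modify q.1 [] (· ++ [q.2])) PySem.Dict.empty from
    by rw [List.foldl_map]; rfl]
  rw [PySem.Dict.getD_foldl_modify_append]
  simp [pvPos, List.filter_map, List.map_map, Function.comp_def]

theorem pv_positions_keys (ws : List String) :
    ((PySem.List.enumerate ws).foldl
      (fun d p => d.modify p.2 [] (· ++ [p.1])) PySem.Dict.empty).keys = PySem.Set.ofList ws := by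
  rw [PySem.Dict.keys_foldl_modify_key]
  simp [PySem.List.map_snd_enumerate, PySem.Set.update, PySem.Set.ofList_eq_foldl]

theorem pv_positions_keys_nodup (ws : List String) :
    ((PySem.List.enumerate ws).foldl
      (fun d p => d.modify p.2 [] (· ++ [p.1])) PySem.Dict.empty).keys.Nodup := by
  apply PySem.Dict.nodup_keys_foldl_modify_key
  simp

theorem pv_foldl_nest (text : List (List String)) (s : List String × List String) :
    text.foldl (fun st i => i.foldl pvStepA st) s = (text.flatMap id).foldl pvStepA s := by
  induction text generalizing s with
  | nil => rfl
  | cons h t ih => simp [List.flatMap_cons, List.foldl_append, ih]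


-- ===== VERDICT (by name: the statement is the Claim_ definition above) =====
theorem buildimportantwords_spec : Claim_equal_buildimportantwords := by
  intro text _
  unfold Spec_buildimportantwords buildimportantwords buildimportantwords_alt
    pvPositionsB pvWordsB
  rw [pv_foldl_nest]
  set ws := text.flatMap id with hws
  obtain ⟨h1, h2, h3, h4⟩ := pvA_inv ws
  set positions := (PySem.List.enumerate ws).foldl
    (fun d p => d.modify p.2 [] (· ++ [p.1])) PySem.Dict.empty with hposdef
  have hk : (fun w => PySem.List.pyGetD (positions.getD w []) 1 0) = fun w => pvKey ws w := by
    funext w; rw [hposdef, pv_positions_getD]; rfl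
  have hitems : positions.items = (PySem.Set.ofList ws).map (fun k => (k, pvPos ws k)) := by
    rw [PySem.Dict.items_eq_map_keys positions (pv_positions_keys_nodup ws) [], hposdef,
      pv_positions_keys]
    exact List.map_congr_left fun k _ => by rw [pv_positions_getD]
  have hdups : (positions.items.filter (fun p => decide (1 < p.2.length))).map Prod.fst
      = (PySem.Set.ofList ws).filter (fun k => decide (1 < (pvPos ws k).length)) := by
    rw [hitems, List.filter_map, List.map_map]
    simp [Function.comp_def]
  rw [hk, hdups]
  symm
  apply PySem.List.sorted_eq_of_perm_of_pairwise_lt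
  · rw [List.perm_ext_iff_of_nodup h3 (List.Nodup.filter _ (PySem.Set.nodup_ofList ws))]
    intro a
    rw [h2 a, List.mem_filter, PySem.Set.mem_ofList, pvPos_length]
    constructor
    · intro h
      exact ⟨List.count_pos_iff.mp (by omega), by simp; omega⟩
    · rintro ⟨-, h⟩
      simp at h; omega
  · exact h4
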